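-- pv_equiv track=rewrite | github.com/gobbleyourdong/open_problems | math/prime_numbers/numerics/artin_conjecture.py | squarefree_kernel
-- ===== SOURCE A (Python) =====
-- def squarefree_kernel(n):
--     """Return (sign, squarefree kernel) of n. sign = ±1 via Möbius of kernel."""
--     k = abs(n)
--     rad = 1
--     d = 2
--     while d * d <= k:
--         if k % d == 0:
--             rad *= d
--             while k % d == 0:
--                 k //= d
--         d += 1
--     if k > 1:
--         rad *= k
--     # mu(rad): rad is squarefree by construction
--     # count prime factors
--     m = rad
--     omega = 0
--     d = 2
--     while d * d <= m:
--         if m % d == 0: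
--             omega += 1
--             m //= d
--         d += 1
--     if m > 1:
--         omega += 1
--     mu = (-1) ** omega
--     return mu, rad
-- ===== SOURCE B (Python) =====
-- def squarefree_kernel(n):
--     """Return (sign, squarefree kernel) of n — single trial-division pass."""
--     k = abs(n)
--     rad = 1
--     omega = 0
--     d = 2
--     while d * d <= k:
--         if k % d == 0:
--             rad *= d
--             omega += 1
--             while k % d == 0:
--                 k //= d
--         d += 1
--     if k > 1:
--         rad *= k
--         omega += 1
--     return (-1) ** omega, rad
-- ===== Notes on version B (the rewrite author's own statement) =====
-- stated objective: simpler
-- what changed: B computes the prime-factor count omega inside the same single trial-division pass that builds the radical and derives the sign from omega's parity, deleting A's entire second factorization loop over the radical.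
import Mathlib
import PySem

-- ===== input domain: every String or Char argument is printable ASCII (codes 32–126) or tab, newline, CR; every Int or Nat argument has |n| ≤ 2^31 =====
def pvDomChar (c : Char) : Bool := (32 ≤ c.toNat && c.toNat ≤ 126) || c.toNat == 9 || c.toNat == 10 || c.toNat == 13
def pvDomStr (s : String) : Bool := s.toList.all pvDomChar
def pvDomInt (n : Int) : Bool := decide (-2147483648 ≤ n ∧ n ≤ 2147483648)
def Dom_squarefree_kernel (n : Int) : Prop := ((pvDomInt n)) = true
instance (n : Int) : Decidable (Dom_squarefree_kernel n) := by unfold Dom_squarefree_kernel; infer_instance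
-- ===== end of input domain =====

-- B computes omega in the same single trial-division pass that builds the radical, deleting A's
-- second factorization loop; outputs are identical for every int n.

-- ===== PORT A =====
-- Each while-loop carries a fuel argument that only makes the recursion total (structural, so the
-- kernel can evaluate it); the fuel supplied at each call site is proven sufficient below, so the
-- loops always stop at their Python guard, never by fuel exhaustion.

-- inner `while k % d == 0: k //= d`; the guard `0 < k ∧ 2 ≤ d` only makes the recursion total
-- (A reaches it exclusively with k ≥ d*d ≥ 4 and d ≥ 2, where it is vacuous)
def pyStrip (fuel : ℕ) (k d : Int) : Int :=
  match fuel with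
  | 0 => k
  | f + 1 =>
    if 0 < k ∧ 2 ≤ d ∧ PySem.Int.mod k d = 0 then pyStrip f (PySem.Int.floordiv k d) d else k

-- first while-loop of A: strips each found prime and accumulates rad
def loop1 (fuel : ℕ) (k rad d : Int) : Int × Int :=
  match fuel with
  | 0 => (k, rad)
  | f + 1 =>
    if d * d ≤ k then
      if PySem.Int.mod k d = 0 then loop1 f (pyStrip k.toNat k d) (rad * d) (d + 1)
      else loop1 f k rad (d + 1)
    else (k, rad)

-- second while-loop of A: counts prime factors of the (squarefree) radical
def loop2 (fuel : ℕ) (m omega d : Int) : Int × Int :=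
  match fuel with
  | 0 => (m, omega)
  | f + 1 =>
    if d * d ≤ m then
      if PySem.Int.mod m d = 0 then loop2 f (PySem.Int.floordiv m d) (omega + 1) (d + 1)
      else loop2 f m omega (d + 1)
    else (m, omega)

def squarefree_kernel (n : Int) : Int × Int :=
  let k := |n|
  let r1 := loop1 k.toNat k 1 2
  let rad := if 1 < r1.1 then r1.2 * r1.1 else r1.2
  let r2 := loop2 rad.toNat rad 0 2
  let omega := if 1 < r2.1 then r2.2 + 1 else r2.2
  -- Python's mu power: the exponent omega is nonnegative here, so ^ omega.toNat is exact
  ((-1 : Int) ^ omega.toNat, rad)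

-- ===== PORT B =====
-- B's single while-loop: rad and omega accumulated together (same inner strip as A)
def loopB (fuel : ℕ) (k rad omega d : Int) : Int × Int × Int :=
  match fuel with
  | 0 => (k, rad, omega)
  | f + 1 =>
    if d * d ≤ k then
      if PySem.Int.mod k d = 0 then loopB f (pyStrip k.toNat k d) (rad * d) (omega + 1) (d + 1)
      else loopB f k rad omega (d + 1)
    else (k, rad, omega)

def squarefree_kernel_alt (n : Int) : Int × Int :=
  let r := loopB (|n|).toNat |n| 1 0 2
  let rad := if 1 < r.1 then r.2.1 * r.1 else r.2.1
  let omega := if 1 < r.1 then r.2.2 + 1 else r.2.2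
  ((-1 : Int) ^ omega.toNat, rad)

-- ===== PRECONDITION & SPEC =====
def Spec_squarefree_kernel (n : Int) (out : Int × Int) : Prop := out = squarefree_kernel_alt n
instance (n : Int) (out : Int × Int) : Decidable (Spec_squarefree_kernel n out) := by unfold Spec_squarefree_kernel; infer_instance

-- ===== CLAIM (what is proved, stated in full; the proofs are below) =====
def Claim_equal_squarefree_kernel : Prop := ∀ (n : Int), Dom_squarefree_kernel n → Spec_squarefree_kernel n (squarefree_kernel n)

-- ===== LEMMAS AND PROOFS =====

-- Nat-valued mirrors of the loops (all state stays in ℕ; bridged to the Int ports below)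
theorem pv_sq_factsN (d : ℕ) : d = 0 ∨ d ≤ d * d := by
  rcases Nat.eq_zero_or_pos d with hd | hd
  · exact Or.inl hd
  · exact Or.inr (Nat.le_mul_of_pos_left d hd)

def stripN (k d : ℕ) : ℕ :=
  if h : 0 < k ∧ 2 ≤ d ∧ k % d = 0 then stripN (k / d) d else k
termination_by k
decreasing_by exact Nat.div_lt_self h.1 (by omega)

theorem stripN_le (k d : ℕ) : stripN k d ≤ k := by
  fun_induction stripN k d with
  | case1 k h ih => exact le_trans ih (Nat.div_le_self _ _)
  | case2 => exact le_refl _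

def loop1N (k rad d : ℕ) : ℕ × ℕ :=
  if h : d * d ≤ k then
    if k % d = 0 then loop1N (stripN k d) (rad * d) (d + 1)
    else loop1N k rad (d + 1)
  else (k, rad)
termination_by k + 2 - d
decreasing_by
  · have h1 := stripN_le k d
    have h3 := pv_sq_factsN d
    omega
  · have h3 : d = 0 ∨ d ≤ d * d := by
      rcases Nat.eq_zero_or_pos d with hd | hd
      · exact Or.inl hd
      · exact Or.inr (Nat.le_mul_of_pos_left d hd)
    omega

def loop2N (m omega d : ℕ) : ℕ × ℕ :=
  if h : d * d ≤ m then
    if m % d = 0 then loop2N (m / d) (omega + 1) (d + 1)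
    else loop2N m omega (d + 1)
  else (m, omega)
termination_by m + 2 - d
decreasing_by
  · have h1 : m / d ≤ m := Nat.div_le_self _ _
    have h3 := pv_sq_factsN d
    omega
  · have h3 : d = 0 ∨ d ≤ d * d := by
      rcases Nat.eq_zero_or_pos d with hd | hd
      · exact Or.inl hd
      · exact Or.inr (Nat.le_mul_of_pos_left d hd)
    omega

def loopBN (k rad omega d : ℕ) : ℕ × ℕ × ℕ :=
  if h : d * d ≤ k then
    if k % d = 0 then loopBN (stripN k d) (rad * d) (omega + 1) (d + 1)
    else loopBN k rad omega (d + 1)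
  else (k, rad, omega)
termination_by k + 2 - d
decreasing_by
  · have h1 := stripN_le k d
    have h3 := pv_sq_factsN d
    omega
  · have h3 : d = 0 ∨ d ≤ d * d := by
      rcases Nat.eq_zero_or_pos d with hd | hd
      · exact Or.inl hd
      · exact Or.inr (Nat.le_mul_of_pos_left d hd)
    omega

-- bridges: with sufficient fuel, the Int ports at nonnegative arguments compute the casts of
-- the ℕ mirrors (in particular fuel never runs out before the Python loop guard fails)
theorem pyStrip_eq_stripN (fuel k d : ℕ) (hf : k ≤ fuel) :
    pyStrip fuel (k : Int) (d : Int) = ((stripN k d : ℕ) : Int) := by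
  induction fuel generalizing k with
  | zero =>
    have hk0 : k = 0 := by omega
    subst hk0
    rw [pyStrip, stripN, dif_neg (by omega)]
  | succ f ih =>
    by_cases hg : 0 < k ∧ 2 ≤ d ∧ k % d = 0
    · have hgI : 0 < (k : Int) ∧ 2 ≤ (d : Int) ∧ PySem.Int.mod (k : Int) (d : Int) = 0 := by
        rw [PySem.Int.mod_natCast]; omega
      rw [pyStrip, if_pos hgI, PySem.Int.floordiv_natCast, stripN, dif_pos hg]
      exact ih _ (by have := Nat.div_lt_self hg.1 (show 1 < d by omega); omega)
    · have hgI : ¬ (0 < (k : Int) ∧ 2 ≤ (d : Int) ∧ PySem.Int.mod (k : Int) (d : Int) = 0) := by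
        rw [PySem.Int.mod_natCast]; omega
      rw [pyStrip, if_neg hgI, stripN, dif_neg hg]

theorem loop1_eq_loop1N (fuel k rad d : ℕ) (hf : k + 2 ≤ d + fuel) :
    loop1 fuel (k : Int) (rad : Int) (d : Int)
      = (((loop1N k rad d).1 : Int), ((loop1N k rad d).2 : Int)) := by
  induction fuel generalizing k rad d with
  | zero =>
    have hng : ¬ d * d ≤ k := by
      intro hdd
      have h3 := pv_sq_factsN d
      omega
    rw [loop1, loop1N, dif_neg hng]
  | succ f ih =>
    by_cases hg : d * d ≤ k
    · have hgI : ((d : Int)) * d ≤ (k : Int) := by exact_mod_cast hg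
      by_cases hm : k % d = 0
      · have hmod : PySem.Int.mod (k : Int) (d : Int) = 0 := by
          rw [PySem.Int.mod_natCast]; exact_mod_cast hm
        rw [loop1, if_pos hgI, if_pos hmod, Int.toNat_natCast,
          pyStrip_eq_stripN k k d (le_refl k), loop1N, dif_pos hg, if_pos hm]
        have hs := stripN_le k d
        have hc : ((rad : Int)) * d = ((rad * d : ℕ) : Int) := by push_cast; ring
        rw [hc, show ((d : Int)) + 1 = ((d + 1 : ℕ) : Int) by push_cast; ring]
        exact ih _ _ _ (by omega)
      · have hmod : ¬ PySem.Int.mod (k : Int) (d : Int) = 0 := by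
          rw [PySem.Int.mod_natCast]; exact_mod_cast hm
        rw [loop1, if_pos hgI, if_neg hmod, loop1N, dif_pos hg, if_neg hm,
          show ((d : Int)) + 1 = ((d + 1 : ℕ) : Int) by push_cast; ring]
        exact ih _ _ _ (by omega)
    · have hgI : ¬ ((d : Int)) * d ≤ (k : Int) := by exact_mod_cast hg
      rw [loop1, if_neg hgI, loop1N, dif_neg hg]

theorem loop2_eq_loop2N (fuel m omega d : ℕ) (hf : m + 2 ≤ d + fuel) :
    loop2 fuel (m : Int) (omega : Int) (d : Int)
      = (((loop2N m omega d).1 : Int), ((loop2N m omega d).2 : Int)) := by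
  induction fuel generalizing m omega d with
  | zero =>
    have hng : ¬ d * d ≤ m := by
      intro hdd
      have h3 := pv_sq_factsN d
      omega
    rw [loop2, loop2N, dif_neg hng]
  | succ f ih =>
    by_cases hg : d * d ≤ m
    · have hgI : ((d : Int)) * d ≤ (m : Int) := by exact_mod_cast hg
      by_cases hm : m % d = 0
      · have hmod : PySem.Int.mod (m : Int) (d : Int) = 0 := by
          rw [PySem.Int.mod_natCast]; exact_mod_cast hm
        rw [loop2, if_pos hgI, if_pos hmod, PySem.Int.floordiv_natCast,
          loop2N, dif_pos hg, if_pos hm]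
        have hs : m / d ≤ m := Nat.div_le_self m d
        rw [show ((omega : Int)) + 1 = ((omega + 1 : ℕ) : Int) by push_cast; ring,
          show ((d : Int)) + 1 = ((d + 1 : ℕ) : Int) by push_cast; ring]
        exact ih _ _ _ (by omega)
      · have hmod : ¬ PySem.Int.mod (m : Int) (d : Int) = 0 := by
          rw [PySem.Int.mod_natCast]; exact_mod_cast hm
        rw [loop2, if_pos hgI, if_neg hmod, loop2N, dif_pos hg, if_neg hm,
          show ((d : Int)) + 1 = ((d + 1 : ℕ) : Int) by push_cast; ring]
        exact ih _ _ _ (by omega)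
    · have hgI : ¬ ((d : Int)) * d ≤ (m : Int) := by exact_mod_cast hg
      rw [loop2, if_neg hgI, loop2N, dif_neg hg]

theorem loopB_eq_loopBN (fuel k rad omega d : ℕ) (hf : k + 2 ≤ d + fuel) :
    loopB fuel (k : Int) (rad : Int) (omega : Int) (d : Int) =
      (((loopBN k rad omega d).1 : Int), ((loopBN k rad omega d).2.1 : Int),
        ((loopBN k rad omega d).2.2 : Int)) := by
  induction fuel generalizing k rad omega d with
  | zero =>
    have hng : ¬ d * d ≤ k := by
      intro hdd
      have h3 := pv_sq_factsN d
      omega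
    rw [loopB, loopBN, dif_neg hng]
  | succ f ih =>
    by_cases hg : d * d ≤ k
    · have hgI : ((d : Int)) * d ≤ (k : Int) := by exact_mod_cast hg
      by_cases hm : k % d = 0
      · have hmod : PySem.Int.mod (k : Int) (d : Int) = 0 := by
          rw [PySem.Int.mod_natCast]; exact_mod_cast hm
        rw [loopB, if_pos hgI, if_pos hmod, Int.toNat_natCast,
          pyStrip_eq_stripN k k d (le_refl k), loopBN, dif_pos hg, if_pos hm]
        have hs := stripN_le k d
        rw [show ((rad : Int)) * d = ((rad * d : ℕ) : Int) by push_cast; ring,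
          show ((omega : Int)) + 1 = ((omega + 1 : ℕ) : Int) by push_cast; ring,
          show ((d : Int)) + 1 = ((d + 1 : ℕ) : Int) by push_cast; ring]
        exact ih _ _ _ _ (by omega)
      · have hmod : ¬ PySem.Int.mod (k : Int) (d : Int) = 0 := by
          rw [PySem.Int.mod_natCast]; exact_mod_cast hm
        rw [loopB, if_pos hgI, if_neg hmod, loopBN, dif_pos hg, if_neg hm,
          show ((d : Int)) + 1 = ((d + 1 : ℕ) : Int) by push_cast; ring]
        exact ih _ _ _ _ (by omega)
    · have hgI : ¬ ((d : Int)) * d ≤ (k : Int) := by exact_mod_cast hg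
      rw [loopB, if_neg hgI, loopBN, dif_neg hg]

theorem loop1N_eq_loopBN (k rad d omega : ℕ) :
    loop1N k rad d = ((loopBN k rad omega d).1, (loopBN k rad omega d).2.1) := by
  fun_induction loopBN k rad omega d with
  | case1 k rad omega d h hm ih =>
    rw [loop1N, dif_pos h, if_pos hm]
    exact ih
  | case2 k rad omega d h hm ih =>
    rw [loop1N, dif_pos h, if_neg hm]
    exact ih
  | case3 k rad omega d h =>
    rw [loop1N, dif_neg h]

-- mathematics: what the loops compute
theorem pv_min_div_prime (k d : ℕ) (hk : 0 < k) (hd2 : 2 ≤ d) (hdvd : d ∣ k)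
    (hinv : ∀ p, p.Prime → p ∣ k → d ≤ p) : d.Prime := by
  obtain ⟨q, hq, hqd⟩ := Nat.exists_prime_and_dvd (show d ≠ 1 by omega)
  have hqk : q ∣ k := hqd.trans hdvd
  have h1 : d ≤ q := hinv q hq hqk
  have h2 : q ≤ d := Nat.le_of_dvd (by omega) hqd
  have h3 : q = d := by omega
  rwa [← h3]

theorem stripN_spec (k d : ℕ) (hk : 0 < k) (hd : d.Prime) :
    0 < stripN k d ∧ ¬ d ∣ stripN k d ∧ (stripN k d).primeFactors = k.primeFactors.erase d := by
  fun_induction stripN k d with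
  | case1 k h ih =>
    have hdvd : d ∣ k := Nat.dvd_of_mod_eq_zero h.2.2
    have hpos : 0 < k / d := Nat.div_pos (Nat.le_of_dvd h.1 hdvd) (by omega)
    obtain ⟨ih1, ih2, ih3⟩ := ih hpos
    refine ⟨ih1, ih2, ?_⟩
    rw [ih3]
    have hk_eq : d * (k / d) = k := Nat.mul_div_cancel' hdvd
    conv_rhs => rw [← hk_eq]
    rw [Nat.primeFactors_mul (by omega) hpos.ne', hd.primeFactors,
      Finset.erase_union_distrib, Finset.erase_singleton, Finset.empty_union]
  | case2 k h =>
    have hnd : ¬ d ∣ k := by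
      intro hdvd
      exact h ⟨hk, hd.two_le, Nat.mod_eq_zero_of_dvd hdvd⟩
    refine ⟨hk, hnd, (Finset.erase_eq_of_notMem ?_).symm⟩
    intro hmem
    exact hnd (Nat.dvd_of_mem_primeFactors hmem)

theorem pv_prime_of_bound (k d : ℕ) (h1 : 1 < k) (h2 : ¬ d * d ≤ k)
    (h3 : ∀ p, p.Prime → p ∣ k → d ≤ p) : k.Prime := by
  have hp : k.minFac.Prime := Nat.minFac_prime (by omega)
  have hpd : k.minFac ∣ k := Nat.minFac_dvd k
  have hq : k.minFac * (k / k.minFac) = k := Nat.mul_div_cancel' hpd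
  by_cases hq1 : k / k.minFac = 1
  · rw [hq1, Nat.mul_one] at hq
    rw [← hq]; exact hp
  · exfalso
    have hqpos : 0 < k / k.minFac := Nat.div_pos (Nat.minFac_le (by omega)) hp.pos
    have hr : (k / k.minFac).minFac.Prime := Nat.minFac_prime hq1
    have hrd : (k / k.minFac).minFac ∣ k := dvd_trans (Nat.minFac_dvd _) (Dvd.intro_left _ hq)
    have hmul : k.minFac * (k / k.minFac).minFac ∣ k := by
      calc k.minFac * (k / k.minFac).minFac ∣ k.minFac * (k / k.minFac) :=
            mul_dvd_mul_left _ (Nat.minFac_dvd _)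
        _ = k := hq
    have hle : k.minFac * (k / k.minFac).minFac ≤ k := Nat.le_of_dvd (by omega) hmul
    have hd1 : d ≤ k.minFac := h3 _ hp hpd
    have hd2 : d ≤ (k / k.minFac).minFac := h3 _ hr hrd
    have : d * d ≤ k.minFac * (k / k.minFac).minFac := Nat.mul_le_mul hd1 hd2
    omega

theorem loopBN_spec (k rad omega d : ℕ) (hk : 0 < k) (hd2 : 2 ≤ d)
    (hinv : ∀ p, p.Prime → p ∣ k → d ≤ p) :
    (if 1 < (loopBN k rad omega d).1
      then ((loopBN k rad omega d).2.1 * (loopBN k rad omega d).1, (loopBN k rad omega d).2.2 + 1)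
      else ((loopBN k rad omega d).2.1, (loopBN k rad omega d).2.2))
      = (rad * ∏ p ∈ k.primeFactors, p, omega + k.primeFactors.card) := by
  fun_induction loopBN k rad omega d with
  | case1 k rad omega d h hm ih =>
    have hdvd : d ∣ k := Nat.dvd_of_mod_eq_zero hm
    have hdp : d.Prime := pv_min_div_prime k d hk hd2 hdvd hinv
    obtain ⟨hs1, hs2, hs3⟩ := stripN_spec k d hk hdp
    have hinv' : ∀ p, p.Prime → p ∣ stripN k d → d + 1 ≤ p := by
      intro p hp hpd
      have hmem : p ∈ (stripN k d).primeFactors := Nat.mem_primeFactors.mpr ⟨hp, hpd, hs1.ne'⟩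
      rw [hs3] at hmem
      obtain ⟨hne, hmem'⟩ := Finset.mem_erase.mp hmem
      have := hinv p hp (Nat.dvd_of_mem_primeFactors hmem')
      omega
    rw [ih hs1 (by omega) hinv', hs3]
    have hdk : d ∈ k.primeFactors := Nat.mem_primeFactors.mpr ⟨hdp, hdvd, hk.ne'⟩
    have hprod : d * ∏ p ∈ k.primeFactors.erase d, p = ∏ p ∈ k.primeFactors, p :=
      Finset.mul_prod_erase _ (fun p => p) hdk
    have hcard : (k.primeFactors.erase d).card = k.primeFactors.card - 1 :=
      Finset.card_erase_of_mem hdk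
    have hcpos : 0 < k.primeFactors.card := Finset.card_pos.mpr ⟨d, hdk⟩
    refine Prod.ext ?_ ?_
    · show rad * d * ∏ p ∈ k.primeFactors.erase d, p = rad * ∏ p ∈ k.primeFactors, p
      rw [← hprod]; ring
    · show omega + 1 + (k.primeFactors.erase d).card = omega + k.primeFactors.card
      omega
  | case2 k rad omega d h hm ih =>
    have hinv' : ∀ p, p.Prime → p ∣ k → d + 1 ≤ p := by
      intro p hp hpd
      have h1 := hinv p hp hpd
      have h2 : p ≠ d := by
        intro he; subst he
        exact hm (Nat.mod_eq_zero_of_dvd hpd)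
      omega
    exact ih hk (by omega) hinv'
  | case3 k rad omega d h =>
    by_cases hk1 : k = 1
    · subst hk1
      simp
    · have hkp : k.Prime := pv_prime_of_bound k d (by omega) h hinv
      rw [hkp.primeFactors]
      simp [hkp.one_lt]

theorem loop2N_spec_aux (m omega d : ℕ) :
    ∀ (s : Finset ℕ), (∀ p ∈ s, p.Prime) → (∀ p ∈ s, d ≤ p) → 2 ≤ d → m = ∏ p ∈ s, p →
    (if 1 < (loop2N m omega d).1 then (loop2N m omega d).2 + 1 else (loop2N m omega d).2)
      = omega + s.card := by
  fun_induction loop2N m omega d with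
  | case1 m omega d h hmod ih =>
    intro s hs hdle hd2 hm
    have hmpos : 0 < m := by
      rw [hm]; exact Finset.prod_pos fun p hp => (hs p hp).pos
    have hdvd : d ∣ m := Nat.dvd_of_mod_eq_zero hmod
    have hdp : d.Prime := by
      obtain ⟨q, hq, hqd⟩ := Nat.exists_prime_and_dvd (show d ≠ 1 by omega)
      have hqm : q ∣ ∏ p ∈ s, p := by rw [← hm] at *; exact hqd.trans hdvd
      obtain ⟨p, hps, hqp⟩ := (Prime.dvd_finset_prod_iff hq.prime _).mp hqm
      have hqep : q = p := (Nat.prime_dvd_prime_iff_eq hq (hs p hps)).mp hqp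
      have h1 : d ≤ q := hqep ▸ hdle p hps
      have h2 : q ≤ d := Nat.le_of_dvd (by omega) hqd
      have h3 : q = d := by omega
      rwa [← h3]
    have hds : d ∈ s := by
      have hdm : d ∣ ∏ p ∈ s, p := hm ▸ hdvd
      obtain ⟨p, hps, hdpq⟩ := (Prime.dvd_finset_prod_iff hdp.prime _).mp hdm
      rwa [(Nat.prime_dvd_prime_iff_eq hdp (hs p hps)).mp hdpq]
    have hprod : d * ∏ p ∈ s.erase d, p = ∏ p ∈ s, p :=
      Finset.mul_prod_erase _ (fun p => p) hds
    have hmd : m / d = ∏ p ∈ s.erase d, p := by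
      rw [hm, ← hprod, Nat.mul_div_cancel_left _ hdp.pos]
    have hres := ih (s.erase d)
      (fun p hp => hs p (Finset.mem_of_mem_erase hp))
      (fun p hp => by
        have h1 := hdle p (Finset.mem_of_mem_erase hp)
        have h2 := Finset.ne_of_mem_erase hp
        omega)
      (by omega) hmd
    rw [hres, Finset.card_erase_of_mem hds]
    have hcpos : 0 < s.card := Finset.card_pos.mpr ⟨d, hds⟩
    omega
  | case2 m omega d h hmod ih =>
    intro s hs hdle hd2 hm
    refine ih s hs ?_ (by omega) hm
    intro p hps
    have h1 := hdle p hps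
    have hpm : p ∣ m := by
      rw [hm]; exact Finset.dvd_prod_of_mem (fun p => p) hps
    have h2 : p ≠ d := by
      intro he
      exact hmod (Nat.mod_eq_zero_of_dvd (he ▸ hpm))
    omega
  | case3 m omega d h =>
    intro s hs hdle hd2 hm
    rcases Finset.eq_empty_or_nonempty s with hse | ⟨p, hps⟩
    · subst hse
      simp only [Finset.prod_empty] at hm
      subst hm
      simp
    · have hpp := hs p hps
      have hmpos : 0 < m := by
        rw [hm]; exact Finset.prod_pos fun q hq => (hs q hq).pos
      have huniq : ∀ q ∈ s, q = p := by
        intro q hqs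
        by_contra hne
        have hsub : ({p, q} : Finset ℕ) ⊆ s := by
          intro x hx
          rcases Finset.mem_insert.mp hx with rfl | hx
          · exact hps
          · rwa [Finset.mem_singleton.mp hx]
        have hdvd2 : p * q ∣ m := by
          have hdv := Finset.prod_dvd_prod_of_subset ({p, q} : Finset ℕ) s (fun x => x) hsub
          rw [Finset.prod_pair (fun he : p = q => hne he.symm)] at hdv
          rw [hm]; exact hdv
        have hle2 : p * q ≤ m := Nat.le_of_dvd hmpos hdvd2
        have hdd : d * d ≤ p * q := Nat.mul_le_mul (hdle p hps) (hdle q hqs)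
        omega
      have hsing : s = {p} := Finset.eq_singleton_iff_unique_mem.mpr ⟨hps, huniq⟩
      subst hsing
      simp only [Finset.prod_singleton] at hm
      subst hm
      simp [hpp.one_lt]

theorem loop2N_spec (m omega d : ℕ) (s : Finset ℕ) (hs : ∀ p ∈ s, p.Prime)
    (hdle : ∀ p ∈ s, d ≤ p) (hd2 : 2 ≤ d) (hm : m = ∏ p ∈ s, p) :
    (if 1 < (loop2N m omega d).1 then (loop2N m omega d).2 + 1 else (loop2N m omega d).2)
      = omega + s.card :=
  loop2N_spec_aux m omega d s hs hdle hd2 hm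

-- ===== VERDICT (by name: the statement is the Claim_ definition above) =====
-- Int-side `if` bounds pushed to ℕ
theorem pv_ite_cast_mul (a b : ℕ) :
    (if (1 : Int) < (a : Int) then (b : Int) * (a : Int) else (b : Int))
      = ((if 1 < a then b * a else b : ℕ) : Int) := by
  by_cases h : 1 < a
  · rw [if_pos h, if_pos (by exact_mod_cast h)]; push_cast; ring
  · rw [if_neg (by exact_mod_cast h), if_neg h]

theorem pv_ite_cast_succ (a b : ℕ) :
    (if (1 : Int) < (a : Int) then (b : Int) + 1 else (b : Int))
      = ((if 1 < a then b + 1 else b : ℕ) : Int) := by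
  by_cases h : 1 < a
  · rw [if_pos h, if_pos (by exact_mod_cast h)]; push_cast; ring
  · rw [if_neg (by exact_mod_cast h), if_neg h]

theorem squarefree_kernel_spec : Claim_equal_squarefree_kernel := by
  intro n _
  unfold Spec_squarefree_kernel
  have habs : |n| = ((n.natAbs : ℕ) : Int) := Int.abs_eq_natAbs n
  rcases Nat.eq_zero_or_pos n.natAbs with h0 | hpos
  · have hn : n = 0 := Int.natAbs_eq_zero.mp h0
    subst hn
    decide
  · have hB := loopB_eq_loopBN n.natAbs n.natAbs 1 0 2 (by omega)
    have h1 := loop1_eq_loop1N n.natAbs n.natAbs 1 2 (by omega)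
    rw [loop1N_eq_loopBN n.natAbs 1 2 0] at h1
    simp only [Nat.cast_one, Nat.cast_ofNat, Nat.cast_zero] at hB h1
    have hspec := loopBN_spec n.natAbs 1 0 2 hpos (le_refl 2) (fun p hp _ => hp.two_le)
    have hrad : (if 1 < (loopBN n.natAbs 1 0 2).1
        then (loopBN n.natAbs 1 0 2).2.1 * (loopBN n.natAbs 1 0 2).1
        else (loopBN n.natAbs 1 0 2).2.1) = ∏ p ∈ n.natAbs.primeFactors, p := by
      have hfst := congrArg Prod.fst hspec
      simpa [apply_ite Prod.fst] using hfst
    have hom : (if 1 < (loopBN n.natAbs 1 0 2).1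
        then (loopBN n.natAbs 1 0 2).2.2 + 1
        else (loopBN n.natAbs 1 0 2).2.2) = n.natAbs.primeFactors.card := by
      have hsnd := congrArg Prod.snd hspec
      simpa [apply_ite Prod.snd] using hsnd
    have h2 := loop2_eq_loop2N (∏ p ∈ n.natAbs.primeFactors, p)
      (∏ p ∈ n.natAbs.primeFactors, p) 0 2 (by omega)
    simp only [Nat.cast_ofNat, Nat.cast_zero] at h2
    have hspec2 := loop2N_spec (∏ p ∈ n.natAbs.primeFactors, p) 0 2 n.natAbs.primeFactors
      (fun p hp => Nat.prime_of_mem_primeFactors hp)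
      (fun p hp => (Nat.prime_of_mem_primeFactors hp).two_le) (le_refl 2) rfl
    simp only [squarefree_kernel, squarefree_kernel_alt, habs, Int.toNat_natCast]
    rw [h1, hB]
    simp only [pv_ite_cast_mul, pv_ite_cast_succ, hrad, hom, Int.toNat_natCast]
    rw [h2]
    simp only [pv_ite_cast_succ, hspec2]
    simp
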